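-- pv_equiv track=rewrite | github.com/jichunl/CSE415 | Assignment1/a1.py | mystery_code
-- ===== SOURCE A (Python) =====
-- def mystery_code(input_string):
-- 	result = ''
-- 	for c in input_string:
-- 		next_char = c
-- 		if str.isalpha(c):
-- 			if c.upper() < 'H':
-- 				if c.islower():
-- 					next_char = chr(ord(c) + 19).upper()
-- 				else:
-- 					next_char = chr(ord(c) + 19).lower()
-- 			else:
-- 				if c.islower():
-- 					next_char = chr(ord(c) - 7).upper()
-- 				else:
-- 					next_char = chr(ord(c) - 7).lower()
-- 		result = result + next_char
-- 	return result
-- ===== SOURCE B (Python) =====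
-- def _build_table():
--     table = {}
--     for o in list(range(65, 91)) + list(range(97, 123)):
--         c = chr(o)
--         shifted = chr(o + 19) if c.upper() < 'H' else chr(o - 7)
--         table[o] = shifted.swapcase()
--     return table
--
-- _TABLE = _build_table()
--
-- def mystery_code(input_string):
--     return input_string.translate(_TABLE)
-- ===== Notes on version B (the rewrite author's own statement) =====
-- stated objective: idiomatic
-- what changed: A's per-character branching loop with repeated string concatenation is replaced by a 52-entry translation table built once (dict keyed by ord) and a single table-driven pass via str.translate.
import Mathlib
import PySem

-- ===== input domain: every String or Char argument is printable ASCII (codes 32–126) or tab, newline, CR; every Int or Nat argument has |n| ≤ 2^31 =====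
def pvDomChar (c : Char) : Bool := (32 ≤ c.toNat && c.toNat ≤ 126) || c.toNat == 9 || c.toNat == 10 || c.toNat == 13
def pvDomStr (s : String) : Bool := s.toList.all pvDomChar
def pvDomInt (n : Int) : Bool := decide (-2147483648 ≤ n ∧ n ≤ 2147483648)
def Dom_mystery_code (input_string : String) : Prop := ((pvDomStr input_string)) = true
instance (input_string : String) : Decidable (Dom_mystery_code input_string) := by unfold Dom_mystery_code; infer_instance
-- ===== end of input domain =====

-- B replaces A's per-character branching loop by a 52-entry translation table built once
-- and a single table-driven pass (str.translate); objective: idiomatic, same output.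

-- ===== PORT A =====
-- per-character body of A's loop, kept branch for branch
def mysteryStepA (c : Char) : Char :=
  let next_char := c
  if PySem.Chars.isalpha c then
    if PySem.Chars.upperChar c < 'H' then
      if PySem.Chars.islower c then PySem.Chars.upperChar (Char.ofNat (c.toNat + 19))
      else PySem.Chars.lowerChar (Char.ofNat (c.toNat + 19))
    else
      if PySem.Chars.islower c then PySem.Chars.upperChar (Char.ofNat (c.toNat - 7))
      else PySem.Chars.lowerChar (Char.ofNat (c.toNat - 7))
  else next_char

def mystery_code (input_string : String) : String :=
  String.mk (input_string.toList.foldl (fun result c => result ++ [mysteryStepA c]) [])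

-- ===== PORT B =====
-- single-char str.swapcase, ported by hand (exact on ASCII)
def pvSwapcase (c : Char) : Char :=
  if PySem.Chars.islower c then PySem.Chars.upperChar c
  else if PySem.Chars.isupper c then PySem.Chars.lowerChar c
  else c

-- _build_table(): the translation table keyed by ord, built once over the 52 letters
def pvTable : PySem.Dict Int Char :=
  (PySem.List.pyRange 65 91 1 ++ PySem.List.pyRange 97 123 1).foldl
    (fun table o =>
      let c := Char.ofNat o.toNat
      let shifted := if PySem.Chars.upperChar c < 'H' then Char.ofNat (o + 19).toNat
                     else Char.ofNat (o - 7).toNat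
      table.insert o (pvSwapcase shifted))
    PySem.Dict.empty

-- str.translate ported by hand: each char's ord is looked up in the table, absent keys fall through
-- unchanged (exact here: every table value is a single character)
def mystery_code_alt (input_string : String) : String :=
  String.mk (input_string.toList.map (fun c => (pvTable.get? (c.toNat : Int)).getD c))

-- ===== PRECONDITION & SPEC =====
def Spec_mystery_code (input_string : String) (out : String) : Prop := out = mystery_code_alt input_string
instance (input_string : String) (out : String) : Decidable (Spec_mystery_code input_string out) := by unfold Spec_mystery_code; infer_instance

-- ===== CLAIM (what is proved, stated in full; the proofs are below) =====
def Claim_equal_mystery_code : Prop := ∀ (input_string : String), Dom_mystery_code input_string → Spec_mystery_code input_string (mystery_code input_string)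

-- ===== LEMMAS AND PROOFS =====
theorem pvFoldlAppend (f : Char → Char) :
    ∀ (l : List Char) (acc : List Char),
      l.foldl (fun r c => r ++ [f c]) acc = acc ++ l.map f := by
  intro l
  induction l with
  | nil => simp
  | cons c t ih => intro acc; simp [List.foldl, ih]

-- the table evaluated once, so the per-char check below never rebuilds it
set_option maxRecDepth 8192 in
theorem pvTableEq : pvTable = PySem.Dict.ofList [((65 : Int), 't'), ((66 : Int), 'u'), ((67 : Int), 'v'), ((68 : Int), 'w'), ((69 : Int), 'x'), ((70 : Int), 'y'), ((71 : Int), 'z'), ((72 : Int), 'a'), ((73 : Int), 'b'), ((74 : Int), 'c'), ((75 : Int), 'd'), ((76 : Int), 'e'), ((77 : Int), 'f'), ((78 : Int), 'g'), ((79 : Int), 'h'), ((80 : Int), 'i'), ((81 : Int), 'j'), ((82 : Int), 'k'), ((83 : Int), 'l'), ((84 : Int), 'm'), ((85 : Int), 'n'), ((86 : Int), 'o'), ((87 : Int), 'p'), ((88 : Int), 'q'), ((89 : Int), 'r'), ((90 : Int), 's'), ((97 : Int), 'T'), ((98 : Int), 'U'), ((99 : Int), 'V'), ((100 : Int), 'W'),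 ((101 : Int), 'X'), ((102 : Int), 'Y'), ((103 : Int), 'Z'), ((104 : Int), 'A'), ((105 : Int), 'B'), ((106 : Int), 'C'), ((107 : Int), 'D'), ((108 : Int), 'E'), ((109 : Int), 'F'), ((110 : Int), 'G'), ((111 : Int), 'H'), ((112 : Int), 'I'), ((113 : Int), 'J'), ((114 : Int), 'K'), ((115 : Int), 'L'), ((116 : Int), 'M'), ((117 : Int), 'N'), ((118 : Int), 'O'), ((119 : Int), 'P'), ((120 : Int), 'Q'), ((121 : Int), 'R'), ((122 : Int), 'S')] := by decide

set_option maxRecDepth 8192 in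
theorem pvCharAgree :
    ∀ n : Nat, n < 127 →
      mysteryStepA (Char.ofNat n) =
        ((pvTable.get? (((Char.ofNat n).toNat : Int))).getD (Char.ofNat n)) := by
  rw [pvTableEq]; decide

-- ===== VERDICT (by name: the statement is the Claim_ definition above) =====
set_option maxRecDepth 8192 in
theorem mystery_code_spec : Claim_equal_mystery_code := by
  intro s hdom
  unfold Spec_mystery_code mystery_code mystery_code_alt
  rw [pvFoldlAppend]
  simp only [List.nil_append]
  refine congrArg String.mk (List.map_congr_left ?_)
  intro c hc
  have hall : pvDomChar c = true := by
    unfold Dom_mystery_code pvDomStr at hdom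
    exact List.all_eq_true.mp hdom c hc
  have hn : c.toNat < 127 := by
    unfold pvDomChar at hall
    simp only [Bool.or_eq_true, Bool.and_eq_true, decide_eq_true_eq, beq_iff_eq] at hall
    omega
  have h := pvCharAgree c.toNat hn
  rwa [Char.ofNat_toNat] at h
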